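-- pv_equiv track=rewrite | github.com/HIROMU1015/Partially-Randomized-Trotter | src/trotterlib/rz_layers.py | greedy_layering
-- ===== SOURCE A (Python) =====
-- from collections.abc import Iterable, Mapping, Sequence
--
-- def greedy_layering(supports: Iterable[frozenset[int]]) -> list[list[frozenset[int]]]:
--     """Greedy graph coloring for Z strings that conflict on shared qubits."""
--     layers: list[list[frozenset[int]]] = []
--
--     for support in supports:
--         for layer in layers:
--             if all(support.isdisjoint(other) for other in layer):
--                 layer.append(support)
--                 break
--         else:
--             layers.append([support])
--
--     return layers
-- ===== SOURCE B (Python) =====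
-- def greedy_layering(supports):
--     """First-fit layering via an index mapping each qubit to the layers using it."""
--     layers = []
--     used = {}  # qubit -> set of indices of layers that touch it
--     for support in supports:
--         blocked = set()
--         for q in support:
--             blocked |= used.get(q, set())
--         idx = next((i for i in range(len(layers) + 1) if i not in blocked),
--                    len(layers))
--         if idx == len(layers):
--             layers.append([support])
--         else:
--             layers[idx].append(support)
--         for q in support:
--             used.setdefault(q, set()).add(idx)
--     return layers
-- ===== Notes on version B (the rewrite author's own statement) =====
-- stated objective: alternative
-- what changed: Replaces A's scan of existing layers with pairwise disjointness tests by a qubit->layer-index map: each support's blocked layer set is the union of the map over its qubits, the support goes into the smallest unblocked index, and the map is updated, so no layer is ever rescanned for disjointness.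
import Mathlib
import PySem

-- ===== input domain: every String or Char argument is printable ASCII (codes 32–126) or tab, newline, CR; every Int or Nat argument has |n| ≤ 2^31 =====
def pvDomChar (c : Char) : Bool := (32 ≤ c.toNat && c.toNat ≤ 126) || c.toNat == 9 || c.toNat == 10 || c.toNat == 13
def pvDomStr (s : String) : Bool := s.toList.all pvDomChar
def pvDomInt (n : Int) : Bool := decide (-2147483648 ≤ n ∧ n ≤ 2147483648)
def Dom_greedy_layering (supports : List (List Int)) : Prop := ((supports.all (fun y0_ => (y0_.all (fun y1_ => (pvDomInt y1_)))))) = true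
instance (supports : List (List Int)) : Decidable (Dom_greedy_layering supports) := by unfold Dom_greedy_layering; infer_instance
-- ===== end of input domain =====

-- B replaces A's per-layer disjointness rescans with a qubit -> layer-index map: first free index, no disjointness tests ('alternative').

-- ===== PORT A =====
-- support.isdisjoint(other)
def pvDisjointA (s t : List Int) : Bool := s.all (fun q => !(t.contains q))

-- A's for-layer / for-else loop: put support into the first all-disjoint layer, else start a new layer
def pvPlaceA (support : List Int) : List (List (List Int)) → List (List (List Int))
  | [] => [[support]]
  | layer :: rest =>
    if layer.all (fun other => pvDisjointA support other) then
      (layer ++ [support]) :: rest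
    else
      layer :: pvPlaceA support rest

def greedy_layering (supports : List (List Int)) : List (List (List Int)) :=
  supports.foldl (fun layers support => pvPlaceA support layers) []

-- ===== PORT B =====
-- one iteration of Source B's main loop over the state (layers, used)
def pvBStep (st : List (List (List Int)) × PySem.Dict Int (PySem.Set Nat)) (support : List Int) :
    List (List (List Int)) × PySem.Dict Int (PySem.Set Nat) :=
  let layers := st.1
  let used := st.2
  let blocked : PySem.Set Nat :=
    support.foldl (fun acc q => PySem.Set.union acc (used.getD q PySem.Set.empty)) PySem.Set.empty
  let idx := ((List.range (layers.length + 1)).find?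
      (fun i => !(PySem.Set.contains blocked i))).getD layers.length
  let layers' := if idx = layers.length then layers ++ [[support]]
                 else layers.modify idx (fun l => l ++ [support])
  let used' := support.foldl (fun d q => d.modify q PySem.Set.empty (fun s => PySem.Set.add s idx)) used
  (layers', used')

def greedy_layering_alt (supports : List (List Int)) : List (List (List Int)) :=
  (supports.foldl pvBStep ([], PySem.Dict.empty)).1

-- ===== PRECONDITION & SPEC =====
def Spec_greedy_layering (supports : List (List Int)) (out : List (List (List Int))) : Prop := out = greedy_layering_alt supports
instance (supports : List (List Int)) (out : List (List (List Int))) : Decidable (Spec_greedy_layering supports out) := by unfold Spec_greedy_layering; infer_instance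

-- ===== CLAIM (what is proved, stated in full; the proofs are below) =====
def Claim_equal_greedy_layering : Prop := ∀ (supports : List (List Int)), Dom_greedy_layering supports → Spec_greedy_layering supports (greedy_layering supports)

-- ===== LEMMAS AND PROOFS =====

-- Invariant: 'used' records, per qubit, exactly the indices of the layers containing it.
def pvInv (layers : List (List (List Int))) (used : PySem.Dict Int (PySem.Set Nat)) : Prop :=
  ∀ (q : Int) (i : Nat),
    i ∈ used.getD q PySem.Set.empty ↔ ∃ h : i < layers.length, ∃ s ∈ layers[i], q ∈ s

-- membership in B's 'blocked' union, generalized over the accumulator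
lemma pvMemBlocked (support : List Int) (used : PySem.Dict Int (PySem.Set Nat)) (i : Nat) :
    ∀ acc : PySem.Set Nat,
    i ∈ support.foldl (fun acc q => PySem.Set.union acc (used.getD q PySem.Set.empty)) acc
      ↔ i ∈ acc ∨ ∃ q ∈ support, i ∈ used.getD q PySem.Set.empty := by
  induction support with
  | nil => simp
  | cons q rest ih =>
    intro acc
    simp only [List.foldl_cons, ih, PySem.Set.mem_union, List.mem_cons]
    constructor
    · rintro ((h | h) | ⟨r, hr, h⟩)
      · exact Or.inl h
      · exact Or.inr ⟨q, Or.inl rfl, h⟩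
      · exact Or.inr ⟨r, Or.inr hr, h⟩
    · rintro (h | ⟨r, (rfl | hr), h⟩)
      · exact Or.inl (Or.inl h)
      · exact Or.inl (Or.inr h)
      · exact Or.inr ⟨r, hr, h⟩

-- membership in 'used' after B's update loop
lemma pvMemUsed (support : List Int) (idx : Nat) (r : Int) (i : Nat) :
    ∀ used : PySem.Dict Int (PySem.Set Nat),
    i ∈ (support.foldl (fun d q => d.modify q PySem.Set.empty (fun s => PySem.Set.add s idx)) used).getD r PySem.Set.empty
      ↔ i ∈ used.getD r PySem.Set.empty ∨ (r ∈ support ∧ i = idx) := by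
  induction support with
  | nil => simp
  | cons q rest ih =>
    intro used
    simp only [List.foldl_cons, ih, List.mem_cons]
    rw [PySem.Dict.getD_modify]
    by_cases hrq : r = q
    · subst hrq
      simp [PySem.Set.mem_add]
      tauto
    · simp [hrq]

-- A's placement scan equals "insert at the first unblocked index / append", for any predicate
-- agreeing with "layer i is not all-disjoint from support".
lemma pvPlaceEq (support : List Int) : ∀ (layers : List (List (List Int))) (p : Nat → Bool),
    (∀ i, p i = true ↔ ∃ h : i < layers.length,
        (layers[i].all (fun other => pvDisjointA support other)) = false) →
    pvPlaceA support layers =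
      (let idx := ((List.range (layers.length + 1)).find? (fun i => !(p i))).getD layers.length
       if idx = layers.length then layers ++ [[support]]
       else layers.modify idx (fun l => l ++ [support])) := by
  intro layers
  induction layers with
  | nil =>
    intro p hp
    have h0 : p 0 = false := by
      have := hp 0; simp at this; simpa using this
    simp [pvPlaceA, h0]
  | cons layer rest ih =>
    intro p hp
    have h0 : p 0 = !(layer.all (fun other => pvDisjointA support other)) := by
      have := hp 0
      cases hall : layer.all (fun other => pvDisjointA support other) <;> simp [hall] at this ⊢ <;> simp [this]
    by_cases hall : layer.all (fun other => pvDisjointA support other) = true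
    · -- first layer fits
      have hp0 : (!p 0) = true := by rw [h0, hall]; rfl
      simp only [pvPlaceA, hall, if_pos, List.length_cons]
      rw [List.range_succ_eq_map, List.find?_cons, hp0]
      simp [List.modify]
    · -- head blocked: both sides shift by one
      have hall' : layer.all (fun other => pvDisjointA support other) = false := by
        simpa using hall
      have hrec := ih (fun j => p (j+1)) (by
        intro j
        have := hp (j+1)
        simpa using this)
      have hp0 : (!p 0) = false := by rw [h0, hall']; rfl
      have hRHS : (List.range ((layer::rest).length + 1)).find? (fun i => !(p i))
          = ((List.range (rest.length + 1)).find? (fun j => !(p (j+1)))).map Nat.succ := by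
        simp only [List.length_cons]
        rw [List.range_succ_eq_map, List.find?_cons, hp0, List.find?_map]
        rfl
      simp only [pvPlaceA, hall', Bool.false_eq_true, if_neg, not_false_iff]
      rw [hrec, hRHS]
      cases hfind : (List.range (rest.length + 1)).find? (fun j => !(p (j+1))) with
      | none => simp [hfind]
      | some j =>
        simp only [hfind, Option.map_some, Option.getD_some, List.length_cons]
        by_cases hj : j = rest.length
        · simp [hj]
        · have hj1 : ¬ (j + 1 = rest.length + 1) := by omega
          simp [hj, hj1, List.modify]

-- under the invariant, 'i blocked' means exactly 'layer i is not all-disjoint from support'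
lemma pvBlockedChar (support : List Int) (layers : List (List (List Int)))
    (used : PySem.Dict Int (PySem.Set Nat)) (hinv : pvInv layers used) :
    ∀ i, (PySem.Set.contains
        (support.foldl (fun acc q => PySem.Set.union acc (used.getD q PySem.Set.empty)) PySem.Set.empty) i) = true
      ↔ ∃ h : i < layers.length, (layers[i].all (fun other => pvDisjointA support other)) = false := by
  intro i
  rw [PySem.Set.contains_iff, pvMemBlocked]
  have hnil : (i ∈ (PySem.Set.empty : PySem.Set Nat)) = False := by simp [PySem.Set.empty]
  rw [hnil, false_or]
  constructor
  · rintro ⟨q, hq, hmem⟩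
    obtain ⟨hi, s, hs, hqs⟩ := (hinv q i).1 hmem
    refine ⟨hi, ?_⟩
    have hw : ∃ s ∈ layers[i], ∃ q ∈ support, q ∈ s := ⟨s, hs, q, hq, hqs⟩
    simpa [List.all_eq_false, pvDisjointA] using hw
  · rintro ⟨hi, hfalse⟩
    have hw : ∃ s ∈ layers[i], ∃ q ∈ support, q ∈ s := by
      simpa [List.all_eq_false, pvDisjointA] using hfalse
    obtain ⟨s, hs, q, hq, hqs⟩ := hw
    exact ⟨q, hq, (hinv q i).2 ⟨hi, s, hs, hqs⟩⟩

-- invariant preservation: a new layer is appended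
lemma pvInvStepAppend (support : List Int) (layers : List (List (List Int)))
    (used : PySem.Dict Int (PySem.Set Nat)) (hinv : pvInv layers used) :
    pvInv (layers ++ [[support]])
          (support.foldl (fun d q => d.modify q PySem.Set.empty (fun s => PySem.Set.add s layers.length)) used) := by
  intro q i
  rw [pvMemUsed, hinv q i]
  constructor
  · rintro (⟨h, s, hs, hqs⟩ | ⟨hq, rfl⟩)
    · exact ⟨by simp; omega, s, by rw [List.getElem_append_left h]; exact hs, hqs⟩
    · refine ⟨by simp, support, ?_, hq⟩
      rw [List.getElem_append_right (le_refl _)]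
      simp
  · rintro ⟨h, s, hs, hqs⟩
    by_cases hi : i < layers.length
    · rw [List.getElem_append_left hi] at hs
      exact Or.inl ⟨hi, s, hs, hqs⟩
    · have hieq : i = layers.length := by simp at h; omega
      subst hieq
      rw [List.getElem_append_right (le_refl _)] at hs
      simp at hs
      subst hs
      exact Or.inr ⟨hqs, rfl⟩

-- invariant preservation: the support joins existing layer idx
lemma pvInvStepModify (support : List Int) (layers : List (List (List Int)))
    (used : PySem.Dict Int (PySem.Set Nat)) (hinv : pvInv layers used)
    (idx : Nat) (hlt : idx < layers.length) :
    pvInv (layers.modify idx (fun l => l ++ [support]))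
          (support.foldl (fun d q => d.modify q PySem.Set.empty (fun s => PySem.Set.add s idx)) used) := by
  intro q i
  rw [pvMemUsed, hinv q i]
  constructor
  · rintro (⟨h, s, hs, hqs⟩ | ⟨hq, rfl⟩)
    · refine ⟨by simpa [List.length_modify] using h, s, ?_, hqs⟩
      rw [List.getElem_modify]
      by_cases hii : idx = i
      · subst hii; simp; exact Or.inl hs
      · simp [hii]; exact hs
    · refine ⟨by simpa [List.length_modify] using hlt, support, ?_, hq⟩
      rw [List.getElem_modify]
      simp
  · rintro ⟨h, s, hs, hqs⟩
    rw [List.getElem_modify] at hs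
    by_cases hii : idx = i
    · subst hii
      simp at hs
      rcases hs with hs | hs
      · exact Or.inl ⟨hlt, s, hs, hqs⟩
      · subst hs; exact Or.inr ⟨hqs, rfl⟩
    · simp [hii] at hs
      exact Or.inl ⟨by simpa [List.length_modify] using h, s, hs, hqs⟩

-- one loop iteration: A's placement equals B's, and the invariant is preserved
lemma pvStep (support : List Int) (layers : List (List (List Int)))
    (used : PySem.Dict Int (PySem.Set Nat)) (hinv : pvInv layers used) :
    pvPlaceA support layers = (pvBStep (layers, used) support).1
      ∧ pvInv (pvBStep (layers, used) support).1 (pvBStep (layers, used) support).2 := by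
  have hp := pvBlockedChar support layers used hinv
  simp only [pvBStep]
  set blocked : PySem.Set Nat :=
    support.foldl (fun acc q => PySem.Set.union acc (used.getD q PySem.Set.empty)) PySem.Set.empty with hblocked
  set idx := ((List.range (layers.length + 1)).find?
      (fun i => !(PySem.Set.contains blocked i))).getD layers.length with hidxdef
  have hle : idx ≤ layers.length := by
    rw [hidxdef]
    cases hf : (List.range (layers.length + 1)).find? (fun i => !(PySem.Set.contains blocked i)) with
    | none => simp
    | some j =>
      have := List.mem_of_find?_eq_some hf
      simp only [List.mem_range] at this
      simp only [Option.getD_some]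
      omega
  refine ⟨?_, ?_⟩
  · rw [pvPlaceEq support layers (fun i => PySem.Set.contains blocked i) hp]
  · by_cases hidx : idx = layers.length
    · rw [if_pos hidx, hidx]
      exact pvInvStepAppend support layers used hinv
    · rw [if_neg hidx]
      exact pvInvStepModify support layers used hinv idx (lt_of_le_of_ne hle hidx)

-- the whole folds agree from any invariant-respecting state
lemma pvMain (supports : List (List Int)) :
    ∀ (layers : List (List (List Int))) (used : PySem.Dict Int (PySem.Set Nat)),
      pvInv layers used →
      supports.foldl (fun ls s => pvPlaceA s ls) layers = (supports.foldl pvBStep (layers, used)).1 := by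
  induction supports with
  | nil => intro _ _ _; rfl
  | cons s rest ih =>
    intro layers used hinv
    obtain ⟨heq, hinv'⟩ := pvStep s layers used hinv
    simp only [List.foldl_cons, heq]
    exact ih _ _ hinv'

-- ===== VERDICT (by name: the statement is the Claim_ definition above) =====
theorem greedy_layering_spec : Claim_equal_greedy_layering := by
  intro supports _
  unfold Spec_greedy_layering greedy_layering greedy_layering_alt
  exact pvMain supports [] PySem.Dict.empty (by
    intro q i
    simp [PySem.Dict.getD_empty, PySem.Set.empty])
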